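-- pv_equiv track=rewrite | github.com/haolunc/ARC-RL | reference_solutions/solutions/9473c6fb.py | transform
-- ===== SOURCE A (Python) =====
-- def transform(grid):
--
--     h = len(grid)
--     w = len(grid[0])
--     out = [row[:] for row in grid]
--
--     first_row_has_non7 = any(cell != 7 for cell in grid[0])
--     seq = [2, 8, 5]
--     idx = 0
--
--     if first_row_has_non7:
--         for r in range(h):
--             for c in range(w):
--                 if grid[r][c] != 7:
--                     out[r][c] = seq[idx % 3]
--                     idx += 1
--     else:
--         for c in range(w):
--             for r in range(h):
--                 if grid[r][c] != 7:
--                     out[r][c] = seq[idx % 3]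
--                     idx += 1
--
--     return out
-- ===== SOURCE B (Python) =====
-- def transform(grid):
--     h = len(grid)
--     w = len(grid[0])
--     seq = [2, 8, 5]
--     cells = [(r, c) for r in range(h) for c in range(w) if grid[r][c] != 7]
--     if not any(x != 7 for x in grid[0]):
--         cells = sorted(cells, key=lambda rc: (rc[1], rc[0]))
--     repl = {rc: seq[i % 3] for i, rc in enumerate(cells)}
--     return [[repl.get((r, c), grid[r][c]) for c in range(w)] for r in range(h)]
-- ===== Notes on version B (the rewrite author's own statement) =====
-- stated objective: alternative
-- what changed: A mutates a copied grid in place with two mirrored nested index loops threading a counter; B instead collects the non-7 positions once, sorts them with a swapped (column,row) key when the first row is all 7s, maps them to the cycling values 2,8,5 with an enumerated dict, and rebuilds the grid by pure lookup; …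
-- outside the precondition, e.g. on transform([[1, 7], [7, 2, 3]]): A returns [[2, 7], [7, 8, 3]], B returns [[2, 7], [7, 8]]
import Mathlib
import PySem

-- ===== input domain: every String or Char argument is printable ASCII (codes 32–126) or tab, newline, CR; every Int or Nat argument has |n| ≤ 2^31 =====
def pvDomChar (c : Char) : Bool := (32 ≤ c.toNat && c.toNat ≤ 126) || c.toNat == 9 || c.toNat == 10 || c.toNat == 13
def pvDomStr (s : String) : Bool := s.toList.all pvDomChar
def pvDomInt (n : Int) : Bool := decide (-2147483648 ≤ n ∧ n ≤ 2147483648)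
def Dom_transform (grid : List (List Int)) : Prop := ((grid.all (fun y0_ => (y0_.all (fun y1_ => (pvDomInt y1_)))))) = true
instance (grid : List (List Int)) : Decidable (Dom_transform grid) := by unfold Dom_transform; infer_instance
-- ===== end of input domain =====

-- B replaces A's two mirrored in-place nested loops by collect-positions / sort-by-swapped-key /
-- enumerate-into-a-dict / rebuild-by-lookup, an alternative algorithm of similar cost, restricted
-- to nonempty rectangular grids (the natural grid domain).


-- ===== PORT A =====
-- out[r][c] = v  (in-range by Pre_; List.set is exact there)
def pySetAt (out : List (List Int)) (r c : Nat) (v : Int) : List (List Int) :=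
  out.set r ((out.getD r []).set c v)

-- the shared loop body of A's two branches: "if grid[r][c] != 7: out[r][c] = seq[idx % 3]; idx += 1"
-- grid[r][c] via getD: exact since Pre_ keeps every visited index in range
def aCellStep (grid : List (List Int)) (st : List (List Int) × Nat) (rc : Nat × Nat) :
    List (List Int) × Nat :=
  if (grid.getD rc.1 []).getD rc.2 0 ≠ 7 then
    (pySetAt st.1 rc.1 rc.2 (([2, 8, 5] : List Int).getD (st.2 % 3) 0), st.2 + 1)
  else st

def transform (grid : List (List Int)) : List (List Int) :=
  let h := grid.length
  let w := (grid.getD 0 []).length          -- grid[0]: Pre_ excludes the empty grid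
  let out := grid.map (fun row => row)      -- [row[:] for row in grid]
  let firstRowHasNon7 := (grid.getD 0 []).any (fun cell => cell ≠ 7)
  if firstRowHasNon7 then
    ((List.range h).foldl
      (fun st r => (List.range w).foldl (fun st c => aCellStep grid st (r, c)) st) (out, 0)).1
  else
    ((List.range w).foldl
      (fun st c => (List.range h).foldl (fun st r => aCellStep grid st (r, c)) st) (out, 0)).1

-- ===== PORT B =====
-- Source B's sort key: lambda rc: (rc[1], rc[0]) — Python tuples compare lexicographically, so Lex
def bKey (rc : Nat × Nat) : Lex (Nat × Nat) := toLex (rc.2, rc.1)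

-- Source B's replacement value: seq[i % 3] with seq = [2, 8, 5]
def bVal (i : Int) : Int := PySem.List.pyGetD ([2, 8, 5] : List Int) (PySem.Int.mod i 3) 0

def transform_alt (grid : List (List Int)) : List (List Int) :=
  let h := grid.length
  let w := (grid.getD 0 []).length
  -- cells = [(r, c) for r in range(h) for c in range(w) if grid[r][c] != 7]
  let cells0 := (List.range h).flatMap (fun r =>
    ((List.range w).filter (fun c => (grid.getD r []).getD c 0 ≠ 7)).map (fun c => (r, c)))
  -- if not any(...): cells = sorted(cells, key=lambda rc: (rc[1], rc[0]))
  let cells := if ¬ (grid.getD 0 []).any (fun x => x ≠ 7)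
    then PySem.List.sorted cells0 bKey
    else cells0
  -- repl = {rc: seq[i % 3] for i, rc in enumerate(cells)}
  let repl := (PySem.List.enumerate cells).foldl
    (fun d p => d.insert p.2 (bVal p.1)) PySem.Dict.empty
  -- [[repl.get((r, c), grid[r][c]) for c in range(w)] for r in range(h)]
  (List.range h).map (fun r => (List.range w).map (fun c =>
    ((repl.get? (r, c)).getD ((grid.getD r []).getD c 0))))

-- ===== PRECONDITION & SPEC =====
-- Pre_ restricts to nonempty rectangular grids, the natural domain of the task: on the empty grid
-- and on grids with a row shorter than the first, A raises IndexError; on grids with a row longer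
-- than the first, A's preservation of the cells beyond the first row's width is an accident of its
-- copy-then-mutate implementation, while B rebuilds every row at the grid's width.
def Pre_transform (grid : List (List Int)) : Prop :=
  grid ≠ [] ∧ ∀ row ∈ grid, row.length = (grid.getD 0 []).length
instance (grid : List (List Int)) : Decidable (Pre_transform grid) := by
  unfold Pre_transform; infer_instance

def pvWitness_transform : List (List Int) := [[1, 7, 7], [7, 2, 7]]

def Spec_transform (grid : List (List Int)) (out : List (List Int)) : Prop := out = transform_alt grid
instance (grid : List (List Int)) (out : List (List Int)) : Decidable (Spec_transform grid out) := by
  unfold Spec_transform; infer_instance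

-- ===== CLAIM (what is proved, stated in full; the proofs are below) =====
def Claim_equal_transform : Prop :=
  ∀ (grid : List (List Int)), Dom_transform grid → Pre_transform grid →
    Spec_transform grid (transform grid)

-- ===== LEMMAS AND PROOFS =====
-- proof-side abbreviations
def gval (grid : List (List Int)) (rc : Nat × Nat) : Int := (grid.getD rc.1 []).getD rc.2 0
def seqv (k : Nat) : Int := ([2, 8, 5] : List Int).getD (k % 3) 0
def genA (grid : List (List Int)) (L : List (Nat × Nat)) (st : List (List Int) × Nat) :
    List (List Int) × Nat := L.foldl (aCellStep grid) st
def cntP (grid : List (List Int)) (L : List (Nat × Nat)) : Nat :=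
  (L.filter (fun rc => gval grid rc ≠ 7)).length
def nfilt (grid : List (List Int)) (L : List (Nat × Nat)) : List (Nat × Nat) :=
  L.filter (fun rc => gval grid rc ≠ 7)
def dictOf (cells : List (Nat × Nat)) : PySem.Dict (Nat × Nat) Int :=
  (PySem.List.enumerate cells).foldl (fun d p => d.insert p.2 (bVal p.1)) PySem.Dict.empty
def Lrow (h w : Nat) : List (Nat × Nat) :=
  (List.range h).flatMap (fun r => (List.range w).map (fun c => (r, c)))
def Lcol (h w : Nat) : List (Nat × Nat) :=
  (List.range w).flatMap (fun c => (List.range h).map (fun r => (r, c)))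

-- pySetAt shape lemmas
theorem pySetAt_length (out : List (List Int)) (r c : Nat) (v : Int) :
    (pySetAt out r c v).length = out.length := by
  simp [pySetAt]

theorem pySetAt_rowlen (out : List (List Int)) (r c : Nat) (v : Int) (r' : Nat) :
    ((pySetAt out r c v).getD r' []).length = (out.getD r' []).length := by
  simp only [pySetAt, List.getD_eq_getElem?_getD, List.getElem?_set]
  split_ifs with h1 h2
  · subst h1; simp
  · have : out[r']? = none := by
      rw [List.getElem?_eq_none_iff]; omega
    simp [this]
  · rfl

theorem pySetAt_getD_ne (out : List (List Int)) (r c : Nat) (v : Int) (r' c' : Nat)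
    (h : r' ≠ r ∨ c' ≠ c) :
    ((pySetAt out r c v).getD r' []).getD c' 0 = (out.getD r' []).getD c' 0 := by
  simp only [pySetAt, List.getD_eq_getElem?_getD, List.getElem?_set]
  split_ifs with h1 h2
  · subst h1
    have hc : c' ≠ c := by tauto
    simp [List.getElem?_set_ne (by omega : c ≠ c'), List.getElem?_eq_getElem h2]
  · have : out[r']? = none := by
      rw [List.getElem?_eq_none_iff]; omega
    simp [this]
  · rfl

theorem pySetAt_getD_self (out : List (List Int)) (r c : Nat) (v : Int)
    (hr : r < out.length) (hc : c < (out.getD r []).length) :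
    ((pySetAt out r c v).getD r []).getD c 0 = v := by
  have hc' : c < (out[r]?.getD []).length := by
    simpa [List.getD_eq_getElem?_getD] using hc
  have hcc : c < out[r].length := by
    simpa [List.getElem?_eq_getElem hr] using hc'
  simp only [pySetAt, List.getD_eq_getElem?_getD, List.getElem?_set]
  simp only [List.getElem?_eq_getElem hr, Option.getD_some]
  simp [hr, List.getElem?_set_self hcc]

-- aCellStep / genA shape lemmas
theorem aCellStep_length (grid : List (List Int)) (st : List (List Int) × Nat) (rc : Nat × Nat) :
    (aCellStep grid st rc).1.length = st.1.length := by
  unfold aCellStep; split_ifs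
  · exact pySetAt_length ..
  · rfl

theorem aCellStep_rowlen (grid : List (List Int)) (st : List (List Int) × Nat) (rc : Nat × Nat)
    (r' : Nat) : ((aCellStep grid st rc).1.getD r' []).length = (st.1.getD r' []).length := by
  unfold aCellStep; split_ifs
  · exact pySetAt_rowlen ..
  · rfl

theorem aCellStep_snd (grid : List (List Int)) (st : List (List Int) × Nat) (rc : Nat × Nat) :
    (aCellStep grid st rc).2 = st.2 + (if gval grid rc ≠ 7 then 1 else 0) := by
  unfold aCellStep gval; split_ifs <;> simp

theorem cntP_cons (grid : List (List Int)) (q : Nat × Nat) (L : List (Nat × Nat)) :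
    cntP grid (q :: L) = (if gval grid q ≠ 7 then 1 else 0) + cntP grid L := by
  unfold cntP
  rw [List.filter_cons]
  by_cases h : gval grid q ≠ 7
  · simp [h, Nat.add_comm]
  · simp [h]

theorem genA_length (grid : List (List Int)) (L : List (Nat × Nat)) (st : List (List Int) × Nat) :
    (genA grid L st).1.length = st.1.length := by
  induction L generalizing st with
  | nil => rfl
  | cons q L ih => rw [genA, List.foldl_cons, ← genA]; rw [ih]; exact aCellStep_length ..

theorem genA_rowlen (grid : List (List Int)) (L : List (Nat × Nat)) (st : List (List Int) × Nat)
    (r' : Nat) : ((genA grid L st).1.getD r' []).length = (st.1.getD r' []).length := by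
  induction L generalizing st with
  | nil => rfl
  | cons q L ih => rw [genA, List.foldl_cons, ← genA]; rw [ih]; exact aCellStep_rowlen ..

theorem aCellStep_entry_ne (grid : List (List Int)) (st : List (List Int) × Nat)
    (q p : Nat × Nat) (hne : p ≠ q) :
    ((aCellStep grid st q).1.getD p.1 []).getD p.2 0 = (st.1.getD p.1 []).getD p.2 0 := by
  have h : p.1 ≠ q.1 ∨ p.2 ≠ q.2 := by
    by_cases hh : p.1 = q.1
    · right; intro h2'; exact hne (Prod.ext hh h2')
    · left; exact hh
  unfold aCellStep; split_ifs
  · exact pySetAt_getD_ne _ _ _ _ _ _ h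
  · rfl

theorem genA_miss (grid : List (List Int)) (L : List (Nat × Nat)) (st : List (List Int) × Nat)
    (p : Nat × Nat) (hp : p ∉ L) :
    ((genA grid L st).1.getD p.1 []).getD p.2 0 = (st.1.getD p.1 []).getD p.2 0 := by
  induction L generalizing st with
  | nil => rfl
  | cons q L ih =>
    rw [genA, List.foldl_cons, ← genA]
    rw [ih _ (fun h => hp (List.mem_cons_of_mem _ h))]
    exact aCellStep_entry_ne _ _ _ _ (fun h => hp (h ▸ List.mem_cons_self ..))

theorem genA_hit (grid : List (List Int)) (L1 L2 : List (Nat × Nat)) (p : Nat × Nat)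
    (h1 : p ∉ L1) (h2 : p ∉ L2) :
    ∀ (st : List (List Int) × Nat), p.1 < st.1.length → p.2 < (st.1.getD p.1 []).length →
    ((genA grid (L1 ++ p :: L2) st).1.getD p.1 []).getD p.2 0 =
      if gval grid p ≠ 7 then seqv (st.2 + cntP grid L1)
      else (st.1.getD p.1 []).getD p.2 0 := by
  induction L1 with
  | nil =>
    intro st hb1 hb2
    rw [List.nil_append, genA, List.foldl_cons, ← genA]
    rw [genA_miss _ _ _ _ h2]
    simp only [cntP, List.filter_nil, List.length_nil, Nat.add_zero]
    simp only [gval]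
    unfold aCellStep
    split_ifs with h
    · rw [pySetAt_getD_self _ _ _ _ hb1 hb2]; rfl
    · rfl
  | cons q L1 ih =>
    intro st hb1 hb2
    rw [List.cons_append, genA, List.foldl_cons, ← genA]
    have hpq : p ≠ q := fun h => h1 (h ▸ List.mem_cons_self ..)
    have hstep1 : (aCellStep grid st q).1.length = st.1.length := aCellStep_length ..
    have hstep2 : ((aCellStep grid st q).1.getD p.1 []).length = (st.1.getD p.1 []).length :=
      aCellStep_rowlen ..
    rw [ih (fun h => h1 (List.mem_cons_of_mem _ h)) _ (hstep1 ▸ hb1) (hstep2 ▸ hb2)]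
    have hcnt : (aCellStep grid st q).2 + cntP grid L1 = st.2 + cntP grid (q :: L1) := by
      rw [aCellStep_snd, cntP_cons]; split_ifs <;> omega
    rw [aCellStep_entry_ne _ _ _ _ hpq, hcnt]

-- order-list bookkeeping (shared by both branches)
theorem getD_of_lt {α : Type} (l : List α) (n : Nat) (d : α) (h : n < l.length) :
    l.getD n d = l[n] := by
  rw [List.getD_eq_getElem?_getD, List.getElem?_eq_getElem h]; rfl

theorem mem_block (r c a : Nat) (l : List Nat) :
    ((r, c) ∈ l.map (fun c' => (a, c'))) ↔ (r = a ∧ c ∈ l) := by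
  simp only [List.mem_map, Prod.mk.injEq]
  constructor
  · rintro ⟨b, hb, h1, h2⟩; exact ⟨h1.symm, h2 ▸ hb⟩
  · rintro ⟨h1, h2⟩; exact ⟨c, h2, h1.symm, rfl⟩

theorem mem_flat (r c : Nat) (l : List Nat) (w : Nat) :
    ((r, c) ∈ l.flatMap (fun r' => (List.range w).map (fun c' => (r', c')))) ↔
      (r ∈ l ∧ c < w) := by
  simp only [List.mem_flatMap]
  constructor
  · rintro ⟨r', hr', hmem⟩
    rw [mem_block] at hmem
    obtain ⟨h1, h2⟩ := hmem
    exact ⟨h1 ▸ hr', by simpa using h2⟩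
  · rintro ⟨h1, h2⟩
    exact ⟨r, h1, (mem_block r c r _).mpr ⟨rfl, by simpa using h2⟩⟩

theorem mem_block_col (r c a : Nat) (l : List Nat) :
    ((r, c) ∈ l.map (fun r' => (r', a))) ↔ (c = a ∧ r ∈ l) := by
  simp only [List.mem_map, Prod.mk.injEq]
  constructor
  · rintro ⟨b, hb, h1, h2⟩; exact ⟨h2.symm, h1 ▸ hb⟩
  · rintro ⟨h1, h2⟩; exact ⟨r, h2, rfl, h1.symm⟩

theorem mem_flat_col (r c : Nat) (l : List Nat) (h : Nat) :
    ((r, c) ∈ l.flatMap (fun c' => (List.range h).map (fun r' => (r', c')))) ↔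
      (c ∈ l ∧ r < h) := by
  simp only [List.mem_flatMap]
  constructor
  · rintro ⟨c', hc', hmem⟩
    rw [mem_block_col] at hmem
    obtain ⟨h1, h2⟩ := hmem
    exact ⟨h1 ▸ hc', by simpa using h2⟩
  · rintro ⟨h1, h2⟩
    exact ⟨c, h1, (mem_block_col r c c _).mpr ⟨rfl, by simpa using h2⟩⟩

theorem mem_Lrow (h w r c : Nat) : ((r, c) ∈ Lrow h w) ↔ (r < h ∧ c < w) := by
  rw [Lrow, mem_flat]; simp

theorem mem_Lcol (h w r c : Nat) : ((r, c) ∈ Lcol h w) ↔ (c < w ∧ r < h) := by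
  rw [Lcol, mem_flat_col]; simp

theorem range_split (r h : Nat) (hr : r < h) :
    List.range h = List.range r ++ r :: ((List.range (h - r - 1)).map (fun i => r + 1 + i)) := by
  have h1 : h = r + ((h - r - 1) + 1) := by omega
  conv_lhs => rw [h1]
  rw [List.range_add, List.range_succ_eq_map]
  simp only [List.map_cons, List.map_map, Nat.add_zero]
  congr 2
  apply List.map_congr_left
  intro a _
  simp [Function.comp]
  omega

theorem map_pair_split (r c w : Nat) (hc : c < w) :
    (List.range w).map (fun c' => (r, c')) =
      ((List.range c).map (fun c' => (r, c'))) ++ (r, c) ::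
        ((List.range (w - c - 1)).map (fun i => (r, c + 1 + i))) := by
  conv_lhs => rw [range_split c w hc]
  simp [List.map_map, Function.comp]

theorem map_pair_split_col (r c h : Nat) (hr : r < h) :
    (List.range h).map (fun r' => (r', c)) =
      ((List.range r).map (fun r' => (r', c))) ++ (r, c) ::
        ((List.range (h - r - 1)).map (fun i => (r + 1 + i, c))) := by
  conv_lhs => rw [range_split r h hr]
  simp [List.map_map, Function.comp]

theorem split_Lrow (h w r c : Nat) (hr : r < h) (hc : c < w) :
    ∃ L1 L2, Lrow h w = L1 ++ (r, c) :: L2 ∧ (r, c) ∉ L1 ∧ (r, c) ∉ L2 := by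
  refine ⟨((List.range r).flatMap (fun r' => (List.range w).map (fun c' => (r', c')))) ++
      ((List.range c).map (fun c' => (r, c'))),
    ((List.range (w - c - 1)).map (fun i => (r, c + 1 + i))) ++
      (((List.range (h - r - 1)).map (fun i => r + 1 + i)).flatMap
        (fun r' => (List.range w).map (fun c' => (r', c')))), ?_, ?_, ?_⟩
  · rw [Lrow]
    conv_lhs => rw [range_split r h hr]
    rw [List.flatMap_append, List.flatMap_cons]
    rw [map_pair_split r c w hc]
    simp [List.append_assoc]
  · rw [List.mem_append, mem_flat, mem_block]
    simp only [List.mem_range]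
    omega
  · rw [List.mem_append, mem_flat]
    simp only [List.mem_map, List.mem_range, Prod.mk.injEq]
    push Not
    constructor
    · intro i hi; omega
    · intro hcontr
      obtain ⟨i, hi, he⟩ := hcontr
      omega

theorem split_Lcol (h w r c : Nat) (hr : r < h) (hc : c < w) :
    ∃ L1 L2, Lcol h w = L1 ++ (r, c) :: L2 ∧ (r, c) ∉ L1 ∧ (r, c) ∉ L2 := by
  refine ⟨((List.range c).flatMap (fun c' => (List.range h).map (fun r' => (r', c')))) ++
      ((List.range r).map (fun r' => (r', c))),
    ((List.range (h - r - 1)).map (fun i => (r + 1 + i, c))) ++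
      (((List.range (w - c - 1)).map (fun i => c + 1 + i)).flatMap
        (fun c' => (List.range h).map (fun r' => (r', c')))), ?_, ?_, ?_⟩
  · rw [Lcol]
    conv_lhs => rw [range_split c w hc]
    rw [List.flatMap_append, List.flatMap_cons]
    rw [map_pair_split_col r c h hr]
    simp [List.append_assoc]
  · rw [List.mem_append, mem_flat_col, mem_block_col]
    simp only [List.mem_range]
    omega
  · rw [List.mem_append, mem_flat_col]
    simp only [List.mem_map, List.mem_range, Prod.mk.injEq]
    push Not
    constructor
    · intro i hi; omega
    · intro hcontr
      obtain ⟨i, hi, he⟩ := hcontr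
      omega

theorem nodup_Lrow (h w : Nat) : (Lrow h w).Nodup := by
  induction h with
  | zero => simp [Lrow]
  | succ n ih =>
    rw [Lrow, List.range_succ, List.flatMap_append, List.flatMap_cons]
    simp only [List.flatMap_nil, List.append_nil]
    apply List.Nodup.append
    · exact ih
    · exact (List.nodup_range).map (fun a b hab => by simpa using hab)
    · intro p hp hq
      obtain ⟨r, c⟩ := p
      rw [mem_flat] at hp
      rw [mem_block] at hq
      simp only [List.mem_range] at hp
      omega

theorem nodup_Lcol (h w : Nat) : (Lcol h w).Nodup := by
  induction w with
  | zero => simp [Lcol]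
  | succ n ih =>
    rw [Lcol, List.range_succ, List.flatMap_append, List.flatMap_cons]
    simp only [List.flatMap_nil, List.append_nil]
    apply List.Nodup.append
    · exact ih
    · exact (List.nodup_range).map (fun a b hab => by simpa using hab)
    · intro p hp hq
      obtain ⟨r, c⟩ := p
      rw [mem_flat_col] at hp
      rw [mem_block_col] at hq
      simp only [List.mem_range] at hp
      omega

theorem perm_row_col (h w : Nat) : (Lrow h w).Perm (Lcol h w) := by
  rw [List.perm_ext_iff_of_nodup (nodup_Lrow h w) (nodup_Lcol h w)]
  rintro ⟨r, c⟩
  rw [mem_Lrow, mem_Lcol]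
  tauto

theorem pairwise_Lcol (h w : Nat) :
    (Lcol h w).Pairwise (fun a b => bKey a < bKey b) := by
  induction w with
  | zero => simp [Lcol]
  | succ n ih =>
    rw [Lcol, List.range_succ, List.flatMap_append, List.flatMap_cons]
    simp only [List.flatMap_nil, List.append_nil]
    rw [List.pairwise_append]
    refine ⟨ih, ?_, ?_⟩
    · rw [List.pairwise_map]
      apply List.Pairwise.imp _ (List.pairwise_lt_range (n := h))
      intro a b hab
      rw [bKey, bKey, Prod.Lex.lt_iff]
      right
      exact ⟨rfl, hab⟩
    · rintro ⟨r, c⟩ hp ⟨r', c'⟩ hq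
      rw [mem_flat_col] at hp
      rw [mem_block_col] at hq
      simp only [List.mem_range] at hp
      obtain ⟨hq1, _⟩ := hq
      subst hq1
      rw [bKey, bKey, Prod.Lex.lt_iff]
      simp only [ofLex_toLex]
      exact Or.inl hp.1

-- B's cells comprehension is the filtered row-major order list
theorem cells0_eq (grid : List (List Int)) (h w : Nat) :
    ((List.range h).flatMap (fun r =>
      ((List.range w).filter (fun c => (grid.getD r []).getD c 0 ≠ 7)).map (fun c => (r, c)))) =
    nfilt grid (Lrow h w) := by
  rw [nfilt, Lrow, List.filter_flatMap]
  apply List.flatMap_congr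
  intro r _
  rw [List.filter_map]
  rfl

-- B's sort brings the cells into column-major order
theorem sorted_cells (grid : List (List Int)) (h w : Nat) :
    PySem.List.sorted (nfilt grid (Lrow h w)) bKey = nfilt grid (Lcol h w) := by
  apply PySem.List.sorted_eq_of_perm_of_pairwise_lt
  · exact (perm_row_col h w).symm.filter _
  · exact (pairwise_Lcol h w).filter _

-- the dict built from enumerate(cells)
theorem bVal_natCast (k : Nat) : bVal (k : Int) = seqv k := by
  have h3 : PySem.Int.mod (k : Int) 3 = ((k % 3 : Nat) : Int) := by
    exact_mod_cast PySem.Int.mod_natCast k 3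
  rw [bVal, h3, PySem.List.pyGetD_natCast]
  rfl

theorem getFold_notmem (cells : List (Nat × Nat)) :
    ∀ (s : Int) (d : PySem.Dict (Nat × Nat) Int) (k : Nat × Nat), k ∉ cells →
      ((PySem.List.enumerate cells s).foldl (fun d p => d.insert p.2 (bVal p.1)) d).get? k =
        d.get? k := by
  induction cells with
  | nil => intro s d k _; rfl
  | cons x rest ih =>
    intro s d k hk
    rw [PySem.List.enumerate_cons, List.foldl_cons]
    rw [ih _ _ _ (fun h => hk (List.mem_cons_of_mem _ h))]
    exact PySem.Dict.get?_insert_of_ne _ _ (fun h => hk (h ▸ List.mem_cons_self ..))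

theorem getFold_mem (cells : List (Nat × Nat)) :
    ∀ (s : Int) (d : PySem.Dict (Nat × Nat) Int) (k : Nat × Nat),
      cells.Nodup → k ∈ cells →
      ((PySem.List.enumerate cells s).foldl (fun d p => d.insert p.2 (bVal p.1)) d).get? k =
        some (bVal (s + (cells.idxOf k : Int))) := by
  induction cells with
  | nil => intro s d k _ hk; simp at hk
  | cons x rest ih =>
    intro s d k hnd hk
    rw [PySem.List.enumerate_cons, List.foldl_cons]
    by_cases hkx : k = x
    · subst hkx
      have hkr : k ∉ rest := (List.nodup_cons.mp hnd).1
      rw [getFold_notmem _ _ _ _ hkr, PySem.Dict.get?_insert_self]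
      rw [List.idxOf_cons_self]
      norm_num
    · have hkr : k ∈ rest := by
        rcases List.mem_cons.mp hk with h | h
        · exact absurd h hkx
        · exact h
      rw [ih _ _ _ (List.nodup_cons.mp hnd).2 hkr]
      have hidx : (x :: rest).idxOf k = rest.idxOf k + 1 := List.idxOf_cons_ne _ (by
        intro h; exact hkx h.symm)
      rw [hidx]
      congr 2
      push_cast
      omega

-- index of a cell in the filtered order list = count of earlier non-7 cells
theorem idx_filt (grid : List (List Int)) (L1 L2 : List (Nat × Nat)) (p : Nat × Nat)
    (h1 : p ∉ L1) (hP : gval grid p ≠ 7) :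
    (nfilt grid (L1 ++ p :: L2)).idxOf p = cntP grid L1 := by
  rw [nfilt, List.filter_append, List.filter_cons, if_pos (by simpa using hP)]
  rw [List.idxOf_append, if_neg (fun h => h1 (List.mem_of_mem_filter h)),
    List.idxOf_cons_self]
  rw [cntP]
  omega

-- one branch, fully: A's fold over an order list O equals B's lookup comprehension
theorem branch_eq (grid : List (List Int)) (w : Nat) (O : List (Nat × Nat))
    (hrect : ∀ row ∈ grid, row.length = w)
    (hnd : O.Nodup)
    (hsplit : ∀ r c, r < grid.length → c < w →
      ∃ L1 L2, O = L1 ++ (r, c) :: L2 ∧ (r, c) ∉ L1 ∧ (r, c) ∉ L2) :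
    (genA grid O (grid, 0)).1 =
      (List.range grid.length).map (fun r => (List.range w).map (fun c =>
        (((dictOf (nfilt grid O)).get? (r, c)).getD ((grid.getD r []).getD c 0)))) := by
  apply List.ext_getElem
  · rw [genA_length]; simp
  intro r hr1 hr2
  have hrg : r < grid.length := by simpa [genA_length] using hr1
  have hrow : (grid.getD r []).length = w := by
    rw [getD_of_lt _ _ _ hrg]
    exact hrect _ (List.getElem_mem _)
  rw [List.getElem_map, List.getElem_range]
  apply List.ext_getElem
  · rw [← getD_of_lt _ _ _ hr1, genA_rowlen, hrow]
    simp
  intro c hc1 hc2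
  have hcw : c < w := by simpa using hc2
  have eL : ((genA grid O (grid, 0)).1.getD r []).getD c 0 =
      ((genA grid O (grid, 0)).1[r]'hr1)[c]'hc1 := by
    rw [getD_of_lt _ r [] hr1, getD_of_lt _ c 0 hc1]
  rw [← eL, List.getElem_map, List.getElem_range]
  obtain ⟨L1, L2, hO, hm1, hm2⟩ := hsplit r c hrg hcw
  have hb2 : c < ((grid, (0 : Nat)).1.getD r []).length := by rw [hrow]; omega
  have hgen : ((genA grid O (grid, 0)).1.getD r []).getD c 0 =
      if gval grid (r, c) ≠ 7 then seqv (0 + cntP grid L1)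
      else ((grid, (0 : Nat)).1.getD r []).getD c 0 := by
    rw [hO]; exact genA_hit grid L1 L2 (r, c) hm1 hm2 (grid, 0) hrg hb2
  rw [hgen]
  by_cases hv : gval grid (r, c) ≠ 7
  · rw [if_pos hv]
    have hmemO : (r, c) ∈ O := by rw [hO]; simp
    have hmemf : (r, c) ∈ nfilt grid O :=
      List.mem_filter.mpr ⟨hmemO, by simpa using hv⟩
    have hndf : (nfilt grid O).Nodup := hnd.filter _
    have hidx : (nfilt grid O).idxOf (r, c) = cntP grid L1 := by
      rw [hO]; exact idx_filt grid L1 L2 (r, c) hm1 hv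
    rw [dictOf, getFold_mem _ _ _ _ hndf hmemf, hidx]
    simp [bVal_natCast]
  · rw [if_neg hv]
    have hmemf : (r, c) ∉ nfilt grid O := fun hc' =>
      hv (by simpa using (List.mem_filter.mp hc').2)
    rw [dictOf, getFold_notmem _ _ _ _ hmemf]
    rfl

theorem main_equiv (grid : List (List Int)) (hpre : Pre_transform grid) :
    transform grid = transform_alt grid := by
  obtain ⟨hne, hrect⟩ := hpre
  simp only [transform, transform_alt]
  rw [List.map_id']
  by_cases hf : (grid.getD 0 []).any (fun cell => cell ≠ 7) = true
  · rw [if_pos hf, if_neg (by simpa using hf)]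
    have hA : (List.range grid.length).foldl
        (fun st r => (List.range (grid.getD 0 []).length).foldl
          (fun st c => aCellStep grid st (r, c)) st) (grid, 0) =
        genA grid (Lrow grid.length (grid.getD 0 []).length) (grid, 0) := by
      rw [genA, Lrow, List.foldl_flatMap]
      simp only [List.foldl_map]
    rw [hA, cells0_eq]
    exact branch_eq grid _ _ (fun row hrow => hrect row hrow) (nodup_Lrow _ _)
      (fun r c hr hc => by
        obtain ⟨L1, L2, hO, h1, h2⟩ := split_Lrow grid.length (grid.getD 0 []).length r c hr hc
        exact ⟨L1, L2, hO, h1, h2⟩)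
  · rw [if_neg hf, if_pos (by simpa using hf)]
    have hA : (List.range (grid.getD 0 []).length).foldl
        (fun st c => (List.range grid.length).foldl
          (fun st r => aCellStep grid st (r, c)) st) (grid, 0) =
        genA grid (Lcol grid.length (grid.getD 0 []).length) (grid, 0) := by
      rw [genA, Lcol, List.foldl_flatMap]
      simp only [List.foldl_map]
    rw [hA, cells0_eq, sorted_cells]
    exact branch_eq grid _ _ (fun row hrow => hrect row hrow) (nodup_Lcol _ _)
      (fun r c hr hc => split_Lcol grid.length (grid.getD 0 []).length r c hr hc)

-- ===== VERDICT (by name: the statement is the Claim_ definition above) =====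
theorem transform_spec : Claim_equal_transform := by
  intro grid _ hpre
  unfold Spec_transform
  exact main_equiv grid hpre
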